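-- pv_equiv track=rewrite | github.com/willshiao/dub-hacks-2020 | ml/posenet/preprocessing.py | TimeSeries
-- ===== SOURCE A (Python) =====
-- PART_NAMES = [
--     "leftShoulder", "rightShoulder", "leftElbow", "rightElbow", "leftWrist", "rightWrist",
--     "leftHip", "rightHip", "leftKnee", "rightKnee", "leftAnkle", "rightAnkle"
-- ]
--
-- def TimeSeries(dictionaries):
--     # combines list of dictionaries
--     TimeSeries = {}
--     # Iterate every part name and combine part values
--     for k in PART_NAMES:
--         tups = [TimeSeries[k] for TimeSeries in dictionaries if k in TimeSeries]
--         TimeSeries[k] = ()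
--         for t in tups:
--             TimeSeries[k] += t
--     return TimeSeries
-- ===== SOURCE B (Python) =====
-- PART_NAMES = [
--     "leftShoulder", "rightShoulder", "leftElbow", "rightElbow", "leftWrist", "rightWrist",
--     "leftHip", "rightHip", "leftKnee", "rightKnee", "leftAnkle", "rightAnkle"
-- ]
--
-- def TimeSeries(dictionaries):
--     # Stage 1: merge ALL keys by iterating each dictionary's items (no membership
--     # tests against PART_NAMES, no rescanning of the dictionaries list per key).
--     acc = {}
--     for d in dictionaries:
--         for k, v in d.items():
--             acc[k] = acc.get(k, ()) + v
--     # Stage 2: project the accumulator onto PART_NAMES (missing parts -> empty tuple).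
--     return {k: acc.get(k, ()) for k in PART_NAMES}
-- ===== Notes on version B (the rewrite author's own statement) =====
-- stated objective: alternative
-- what changed: B merges by iterating each dictionary's own items into one hash accumulator (keyed by whatever keys occur, no PART_NAMES membership tests) and then projects the accumulator onto PART_NAMES in a second stage, instead of A's rescanning the whole dictionaries list once per part name with an intermediate comprehension list.
import Mathlib
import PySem

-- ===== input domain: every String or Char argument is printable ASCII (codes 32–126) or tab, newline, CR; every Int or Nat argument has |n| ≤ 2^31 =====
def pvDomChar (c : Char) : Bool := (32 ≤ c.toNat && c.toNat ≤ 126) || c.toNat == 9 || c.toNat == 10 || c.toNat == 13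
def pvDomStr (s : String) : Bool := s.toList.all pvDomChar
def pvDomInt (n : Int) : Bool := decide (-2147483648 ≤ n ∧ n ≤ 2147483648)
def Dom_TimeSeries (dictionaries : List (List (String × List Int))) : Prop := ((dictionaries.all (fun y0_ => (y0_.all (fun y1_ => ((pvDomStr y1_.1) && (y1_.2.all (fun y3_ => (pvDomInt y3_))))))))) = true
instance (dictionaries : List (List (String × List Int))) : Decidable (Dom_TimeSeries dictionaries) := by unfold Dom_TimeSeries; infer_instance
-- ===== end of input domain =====

-- B merges all dictionaries into ONE hash accumulator by iterating each dictionary's own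
-- items, then projects onto PART_NAMES, instead of A's full rescan of the list per part name
-- (alternative decomposition: items-driven accumulate-then-project).

def PART_NAMES : List String :=
  ["leftShoulder", "rightShoulder", "leftElbow", "rightElbow", "leftWrist", "rightWrist",
   "leftHip", "rightHip", "leftKnee", "rightKnee", "leftAnkle", "rightAnkle"]

-- ===== PORT A =====
-- for k in PART_NAMES:
--   tups = [d[k] for d in dictionaries if k in d]
--   TS[k] = (); for t in tups: TS[k] += t
def TimeSeries (dictionaries : List (List (String × List Int))) : List (String × List Int) :=
  (PART_NAMES.foldl (fun acc k =>
      let tups := dictionaries.filterMap (fun d => (PySem.Dict.mk d).get? k)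
      let acc := acc.insert k []
      tups.foldl (fun acc t => acc.insert k (acc.getD k [] ++ t)) acc)
    PySem.Dict.empty).items

-- ===== PORT B =====
-- acc = {}
-- for d in dictionaries:
--   for k, v in d.items(): acc[k] = acc.get(k, ()) + v
-- return {k: acc.get(k, ()) for k in PART_NAMES}
def TimeSeries_alt (dictionaries : List (List (String × List Int))) : List (String × List Int) :=
  let acc := dictionaries.foldl (fun acc d =>
      (PySem.Dict.mk d).items.foldl
        (fun acc p => acc.insert p.1 (acc.getD p.1 [] ++ p.2)) acc)
    PySem.Dict.empty
  (PART_NAMES.foldl (fun r k => r.insert k (acc.getD k [])) PySem.Dict.empty).items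

-- ===== PRECONDITION & SPEC =====
-- Pre_ excludes association lists in which one dictionary carries a duplicate key: a real
-- Python dict cannot contain one, and there A's first-match lookup versus B's iteration over
-- all items is an accidental first-vs-last artefact of the assoc-list encoding.
def Pre_TimeSeries (dictionaries : List (List (String × List Int))) : Prop :=
  ∀ d ∈ dictionaries, (d.map (·.1)).Nodup
instance (dictionaries : List (List (String × List Int))) : Decidable (Pre_TimeSeries dictionaries) := by unfold Pre_TimeSeries; infer_instance
def pvWitness_TimeSeries : (List (List (String × List Int))) :=
  [[("leftShoulder", [1, 2]), ("rightHip", [3])], [], [("leftShoulder", [4])]]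
def Spec_TimeSeries (dictionaries : List (List (String × List Int))) (out : List (String × List Int)) : Prop := out = TimeSeries_alt dictionaries
instance (dictionaries : List (List (String × List Int))) (out : List (String × List Int)) : Decidable (Spec_TimeSeries dictionaries out) := by unfold Spec_TimeSeries; infer_instance

-- ===== CLAIM (what is proved, stated in full; the proofs are below) =====
def Claim_equal_TimeSeries : Prop := ∀ (dictionaries : List (List (String × List Int))), Dom_TimeSeries dictionaries → Pre_TimeSeries dictionaries → Spec_TimeSeries dictionaries (TimeSeries dictionaries)

-- ===== LEMMAS AND PROOFS =====

-- the per-key value both programs accumulate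
def keyVal (dictionaries : List (List (String × List Int))) (k : String) : List Int :=
  (dictionaries.filterMap (fun d => (PySem.Dict.mk d).get? k)).flatten

-- A's inner '+=' loop over the collected tuples collapses to one insert of their concatenation
lemma foldl_insert_append (k : String) (ts : List (List Int)) :
    ∀ (a : PySem.Dict String (List Int)) (v : List Int),
    ts.foldl (fun a t => a.insert k (a.getD k [] ++ t)) (a.insert k v)
      = a.insert k (v ++ ts.flatten) := by
  induction ts with
  | nil => intro a v; simp [List.foldl]
  | cons t ts ih =>
    intro a v
    simp only [List.foldl, PySem.Dict.getD_insert_self, PySem.Dict.insert_insert_self]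
    rw [ih a (v ++ t)]
    simp [List.append_assoc]

lemma TimeSeries_eq_map (dictionaries : List (List (String × List Int))) :
    TimeSeries dictionaries = PART_NAMES.map (fun k => (k, keyVal dictionaries k)) := by
  unfold TimeSeries
  have h : PART_NAMES.foldl (fun acc k =>
      let tups := dictionaries.filterMap (fun d => (PySem.Dict.mk d).get? k)
      let acc := acc.insert k []
      tups.foldl (fun acc t => acc.insert k (acc.getD k [] ++ t)) acc)
      PySem.Dict.empty
      = PART_NAMES.foldl (fun acc k => acc.insert k (keyVal dictionaries k)) PySem.Dict.empty := by
    apply PySem.List.foldl_congr_mem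
    intro acc k _
    simp only []
    rw [foldl_insert_append]
    simp [keyVal]
  rw [h]
  have hf := PySem.Dict.items_foldl_insert_fresh PART_NAMES (fun s => s)
      (fun k => keyVal dictionaries k) PySem.Dict.empty
      (by intro a _; simp) (by simpa using (by decide : PART_NAMES.Nodup))
  simpa using hf

-- B's inner items loop: each processed pair appends its tuple to its key's slot
lemma accD_foldl (l : List (String × List Int)) :
    ∀ (a : PySem.Dict String (List Int)) (x : String),
    (l.foldl (fun a p => a.insert p.1 (a.getD p.1 [] ++ p.2)) a).getD x []
      = a.getD x [] ++ ((l.filter (fun p => p.1 == x)).map (·.2)).flatten := by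
  induction l with
  | nil => intro a x; simp
  | cons p l ih =>
    intro a x
    simp only [List.foldl_cons, List.filter_cons]
    by_cases hx : p.1 = x
    · subst hx
      simp [ih, PySem.Dict.getD_insert_self, List.append_assoc]
    · have hb : (p.1 == x) = false := by simpa using hx
      rw [ih, PySem.Dict.getD_insert, if_neg (fun h => hx h.symm)]
      simp [hb]

-- on a duplicate-free assoc list, the pairs at key x are exactly the first-match lookup
lemma filter_eq_get?_toList (d : List (String × List Int)) (x : String)
    (hnd : (d.map (·.1)).Nodup) :
    ((d.filter (fun p => p.1 == x)).map (·.2)).flatten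
      = ((PySem.Dict.mk d).get? x).getD [] := by
  induction d with
  | nil => simp [PySem.Dict.get?]
  | cons p d ih =>
    rcases p with ⟨k, v⟩
    simp only [List.map_cons, List.nodup_cons] at hnd
    rw [List.filter_cons]
    by_cases hx : k = x
    · subst hx
      have hnone : (d.filter (fun p => p.1 == k)) = [] := by
        apply List.filter_eq_nil_iff.mpr
        intro p hp hk
        have hpk : p.1 = k := by simpa using hk
        exact absurd (hpk ▸ List.mem_map_of_mem (f := (·.1)) hp) hnd.1
      simp [PySem.Dict.get?_mk_cons, hnone]
    · have hb : (k == x) = false := by simpa using hx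
      simp only [hb, Bool.false_eq_true, if_false, PySem.Dict.get?_mk_cons]
      rw [ih hnd.2]

-- B's outer loop: the accumulator's value at x is keyVal
lemma outer_acc (dicts : List (List (String × List Int))) :
    ∀ (a : PySem.Dict String (List Int)) (x : String),
    (∀ d ∈ dicts, (d.map (·.1)).Nodup) →
    (dicts.foldl (fun acc d =>
        (PySem.Dict.mk d).items.foldl
          (fun acc p => acc.insert p.1 (acc.getD p.1 [] ++ p.2)) acc) a).getD x []
      = a.getD x [] ++ keyVal dicts x := by
  induction dicts with
  | nil => intro a x _; simp [keyVal]
  | cons d dicts ih =>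
    intro a x hnd
    simp only [List.foldl_cons]
    rw [ih _ x (fun d' hd' => hnd d' (List.mem_cons_of_mem _ hd'))]
    rw [accD_foldl]
    rw [filter_eq_get?_toList d x (hnd d List.mem_cons_self)]
    simp only [keyVal, List.filterMap_cons]
    cases hget : (PySem.Dict.mk d).get? x <;> simp [List.append_assoc]

lemma TimeSeries_alt_eq_map (dictionaries : List (List (String × List Int)))
    (hnd : ∀ d ∈ dictionaries, (d.map (·.1)).Nodup) :
    TimeSeries_alt dictionaries = PART_NAMES.map (fun k => (k, keyVal dictionaries k)) := by
  unfold TimeSeries_alt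
  simp only []
  have hf := PySem.Dict.items_foldl_insert_fresh PART_NAMES (fun s => s)
      (fun k => (dictionaries.foldl (fun acc d =>
          (PySem.Dict.mk d).items.foldl
            (fun acc p => acc.insert p.1 (acc.getD p.1 [] ++ p.2)) acc)
        PySem.Dict.empty).getD k [])
      PySem.Dict.empty
      (by intro a _; simp) (by simpa using (by decide : PART_NAMES.Nodup))
  simp only [show (PySem.Dict.empty : PySem.Dict String (List Int)).items = [] from rfl,
    List.nil_append] at hf
  rw [hf]
  apply List.map_congr_left
  intro k _
  rw [outer_acc dictionaries PySem.Dict.empty k hnd]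
  simp

-- ===== VERDICT (by name: the statement is the Claim_ definition above) =====
theorem TimeSeries_spec : Claim_equal_TimeSeries := by
  intro dictionaries _ hpre
  unfold Spec_TimeSeries
  rw [TimeSeries_eq_map, TimeSeries_alt_eq_map dictionaries hpre]
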